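-- pv_equiv track=rewrite | github.com/willywsm1013/transformers-for-question-generation | question_generation/run_question_generation.py | truncate_context
-- ===== SOURCE A (Python) =====
-- def truncate_context(context, ans_pos, max_context_len, a_start, a_end):
--     condition = context[:]
--     if ans_pos is not None:
--         ans_pos = ans_pos[:]
--
--     while len(condition)>max_context_len:
--         if a_start > len(condition)-a_end-1:
--             condition = condition[1:]
--             ans_pos = ans_pos[1:] if ans_pos else None
--             a_start -= 1
--             a_end -= 1
--         else:
--             condition = condition[:-1]
--             ans_pos = ans_pos[:-1] if ans_pos else None
--
--     assert ans_pos is None or len(ans_pos) == len(condition), (len(ans_pos), len(context))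
--     return condition, ans_pos
-- ===== SOURCE B (Python) =====
-- def truncate_context(context, ans_pos, max_context_len, a_start, a_end):
--     n = len(context)
--     k = max(0, n - max_context_len)
--     c = a_start + a_end + 1 - n
--     f = max(0, min(k, (k + c) // 2))
--     hi = n - (k - f)
--     cond = context[f:hi]
--     pos = ans_pos[f:hi] if ans_pos is not None else None
--     return cond, pos
-- ===== Notes on version B (the rewrite author's own statement) =====
-- stated objective: faster
-- what changed: Replaces the one-token-at-a-time while loop (each step slicing whole lists) by a closed-form computation of the number of front removals f = clamp((k + a_start + a_end + 1 - len)//2, 0, k) with k the total removals, followed by a single slice.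
-- outside the precondition, e.g. on truncate_context([1, 2], [], 1, 0, 0): A returns ([1], None), B returns ([1], [])
import Mathlib
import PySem

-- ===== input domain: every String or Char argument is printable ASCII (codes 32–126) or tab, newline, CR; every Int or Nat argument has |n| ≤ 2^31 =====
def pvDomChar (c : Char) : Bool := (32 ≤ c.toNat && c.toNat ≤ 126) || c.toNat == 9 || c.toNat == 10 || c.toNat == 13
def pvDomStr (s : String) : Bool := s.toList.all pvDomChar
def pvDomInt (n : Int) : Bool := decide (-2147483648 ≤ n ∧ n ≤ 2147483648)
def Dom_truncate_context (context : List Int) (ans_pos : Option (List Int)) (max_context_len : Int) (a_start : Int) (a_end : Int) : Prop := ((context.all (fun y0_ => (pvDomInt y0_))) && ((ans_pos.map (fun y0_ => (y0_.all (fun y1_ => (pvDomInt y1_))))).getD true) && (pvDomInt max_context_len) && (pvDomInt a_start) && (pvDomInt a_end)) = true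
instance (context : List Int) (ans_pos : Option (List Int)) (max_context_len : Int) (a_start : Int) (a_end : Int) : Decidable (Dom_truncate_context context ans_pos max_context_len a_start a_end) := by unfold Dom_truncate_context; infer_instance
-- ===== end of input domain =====

-- B replaces A's one-token-at-a-time trimming loop by a closed-form count of front
-- removals and one final slice (timed measurably faster on large inputs).

-- ===== PORT A =====
-- the while loop; fuel bounds the iterations (length strictly decreases each pass,
-- so context.length fuel suffices on every input Pre_ admits)
def truncate_context_loop (fuel : Nat) (cond : List Int) (ap : Option (List Int)) (mcl a_start a_end : Int) : List Int × Option (List Int) :=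
  match fuel with
  | 0 => (cond, ap)
  | fuel + 1 =>
    if (cond.length : Int) > mcl then
      if a_start > (cond.length : Int) - a_end - 1 then
        truncate_context_loop fuel (PySem.List.slice cond (some 1) none)
          (match ap with
           | some l => if l.isEmpty then none else some (PySem.List.slice l (some 1) none)
           | none => none)
          mcl (a_start - 1) (a_end - 1)
      else
        truncate_context_loop fuel (PySem.List.slice cond none (some (-1)))
          (match ap with
           | some l => if l.isEmpty then none else some (PySem.List.slice l none (some (-1)))
           | none => none)
          mcl a_start a_end
    else (cond, ap)

def truncate_context (context : List Int) (ans_pos : Option (List Int)) (max_context_len : Int) (a_start : Int) (a_end : Int) : List Int × Option (List Int) :=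
  truncate_context_loop context.length
    (PySem.List.slice context none none)
    (match ans_pos with
     | some l => some (PySem.List.slice l none none)
     | none => none)
    max_context_len a_start a_end

-- ===== PORT B =====
def truncate_context_alt (context : List Int) (ans_pos : Option (List Int)) (max_context_len : Int) (a_start : Int) (a_end : Int) : List Int × Option (List Int) :=
  let n : Int := context.length
  let k : Int := max 0 (n - max_context_len)
  let c : Int := a_start + a_end + 1 - n
  let f : Int := max 0 (min k (PySem.Int.floordiv (k + c) 2))
  let hi : Int := n - (k - f)
  (PySem.List.slice context (some f) (some hi),
   match ans_pos with
   | some l => some (PySem.List.slice l (some f) (some hi))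
   | none => none)

-- ===== PRECONDITION & SPEC =====
-- Pre_ excludes max_context_len < 0, on which A loops forever, and an ans_pos whose
-- length differs from context's, on which A either fails its assert or accidentally
-- collapses an exhausted ans_pos to None (an artefact of its truthiness test).
def Pre_truncate_context (context : List Int) (ans_pos : Option (List Int)) (max_context_len : Int) (a_start : Int) (a_end : Int) : Prop :=
  0 ≤ max_context_len ∧ (ans_pos = none ∨ ans_pos.map List.length = some (context.length))
instance (context : List Int) (ans_pos : Option (List Int)) (max_context_len : Int) (a_start : Int) (a_end : Int) : Decidable (Pre_truncate_context context ans_pos max_context_len a_start a_end) := by unfold Pre_truncate_context; infer_instance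

def pvWitness_truncate_context : List Int × Option (List Int) × Int × Int × Int := ([1, 2, 3, 4], some [5, 6, 7, 8], 2, 1, 1)

def Spec_truncate_context (context : List Int) (ans_pos : Option (List Int)) (max_context_len : Int) (a_start : Int) (a_end : Int) (out : List Int × Option (List Int)) : Prop := out = truncate_context_alt context ans_pos max_context_len a_start a_end
instance (context : List Int) (ans_pos : Option (List Int)) (max_context_len : Int) (a_start : Int) (a_end : Int) (out : List Int × Option (List Int)) : Decidable (Spec_truncate_context context ans_pos max_context_len a_start a_end out) := by unfold Spec_truncate_context; infer_instance

-- ===== CLAIM (what is proved, stated in full; the proofs are below) =====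
def Claim_equal_truncate_context : Prop := ∀ (context : List Int) (ans_pos : Option (List Int)) (max_context_len : Int) (a_start : Int) (a_end : Int), Dom_truncate_context context ans_pos max_context_len a_start a_end → Pre_truncate_context context ans_pos max_context_len a_start a_end → Spec_truncate_context context ans_pos max_context_len a_start a_end (truncate_context context ans_pos max_context_len a_start a_end)

-- ===== LEMMAS AND PROOFS =====

-- shifting a slice one step past a removed head
lemma slice_tail_shift {α : Type} (xs : List α) (a b : Int) (ha : 1 ≤ a) (hb : 1 ≤ b) :
    PySem.List.slice xs.tail (some (a - 1)) (some (b - 1)) = PySem.List.slice xs (some a) (some b) := by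
  rw [PySem.List.slice_toNat xs.tail (by omega) (by omega),
      PySem.List.slice_toNat xs (by omega) (by omega),
      ← List.drop_one, List.drop_drop]
  congr 1
  · omega
  · congr 1
    omega

-- a slice that stays left of the last element ignores dropLast
lemma slice_dropLast_eq {α : Type} (xs : List α) (a b : Int) (ha : 0 ≤ a) (hb0 : 0 ≤ b)
    (hb : b ≤ (xs.length : Int) - 1) :
    PySem.List.slice xs.dropLast (some a) (some b) = PySem.List.slice xs (some a) (some b) := by
  rw [PySem.List.slice_toNat xs.dropLast ha hb0, PySem.List.slice_toNat xs ha hb0]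
  rw [List.dropLast_eq_take, List.drop_take, List.take_take]
  congr 1
  omega

-- B returns its input unchanged when no trimming is needed
lemma alt_stop (context : List Int) (ap : Option (List Int)) (mcl s e : Int)
    (hm : 0 ≤ mcl) (hn : (context.length : Int) ≤ mcl)
    (hl : ∀ l, ap = some l → l.length = context.length) :
    truncate_context_alt context ap mcl s e = (context, ap) := by
  simp only [truncate_context_alt]
  have hk : max 0 ((context.length : Int) - mcl) = 0 := by omega
  rw [hk]
  have hf : max 0 (min 0 (PySem.Int.floordiv (0 + (s + e + 1 - (context.length : Int))) 2)) = 0 := by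
    set d := PySem.Int.floordiv (0 + (s + e + 1 - (context.length : Int))) 2 with hd
    omega
  rw [hf]
  have hfull : ∀ (ys : List Int), ys.length = context.length →
      PySem.List.slice ys (some 0) (some ((context.length : Int) - (0 - 0))) = ys := by
    intro ys hys
    rw [PySem.List.slice_toNat ys (by omega) (by omega)]
    simp [← hys]
  simp only [Prod.mk.injEq]
  refine ⟨hfull context rfl, ?_⟩
  cases ap with
  | none => rfl
  | some l => simp only [Option.some.injEq]; exact hfull l (hl l rfl)

-- one front removal of A corresponds to shifting B's closed form
lemma alt_front (context : List Int) (ap : Option (List Int)) (mcl s e : Int)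
    (hm : 0 ≤ mcl) (hn : (context.length : Int) > mcl)
    (hc : s > (context.length : Int) - e - 1)
    (hl : ∀ l, ap = some l → l.length = context.length) :
    truncate_context_alt context.tail (ap.map List.tail) mcl (s - 1) (e - 1)
      = truncate_context_alt context ap mcl s e := by
  simp only [truncate_context_alt]
  have hlen' : (context.tail.length : Int) = (context.length : Int) - 1 := by
    rw [List.length_tail]; omega
  rw [hlen']
  set n : Int := (context.length : Int) with hnd
  rw [PySem.Int.floordiv_eq_ediv_of_pos (by omega), PySem.Int.floordiv_eq_ediv_of_pos (by omega)]
  set c : Int := s + e + 1 - n with hcd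
  have hk : max 0 (n - 1 - mcl) = max 0 (n - mcl) - 1 := by omega
  rw [hk]
  set k : Int := max 0 (n - mcl) with hkd
  have hc1 : 1 ≤ c := by omega
  have hk1 : 1 ≤ k := by omega
  have harg : k - 1 + (s - 1 + (e - 1) + 1 - (n - 1)) = k + c - 2 := by omega
  rw [harg]
  have hdiv : (k + c - 2) / 2 = (k + c) / 2 - 1 := by omega
  rw [hdiv]
  have hd1 : 1 ≤ (k + c) / 2 := by omega
  set d : Int := (k + c) / 2 with hdd
  have hf : max 0 (min (k - 1) (d - 1)) = max 0 (min k d) - 1 := by omega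
  rw [hf]
  set f : Int := max 0 (min k d) with hfd
  have hf1 : 1 ≤ f := by omega
  have hhi : n - 1 - (k - 1 - (f - 1)) = n - (k - f) - 1 := by omega
  rw [hhi]
  have hkn : k ≤ n := by omega
  have hb1 : 1 ≤ n - (k - f) := by omega
  simp only [Prod.mk.injEq]
  refine ⟨slice_tail_shift context f (n - (k - f)) hf1 hb1, ?_⟩
  cases ap with
  | none => rfl
  | some l =>
    simp only [Option.map_some, Option.some.injEq]
    exact slice_tail_shift l f (n - (k - f)) hf1 hb1

-- one back removal of A leaves B's closed form unchanged
lemma alt_back (context : List Int) (ap : Option (List Int)) (mcl s e : Int)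
    (hm : 0 ≤ mcl) (hn : (context.length : Int) > mcl)
    (hc : ¬ s > (context.length : Int) - e - 1)
    (hl : ∀ l, ap = some l → l.length = context.length) :
    truncate_context_alt context.dropLast (ap.map List.dropLast) mcl s e
      = truncate_context_alt context ap mcl s e := by
  simp only [truncate_context_alt]
  have hlen' : (context.dropLast.length : Int) = (context.length : Int) - 1 := by
    rw [List.length_dropLast]
    have : 1 ≤ context.length := by omega
    omega
  rw [hlen']
  set n : Int := (context.length : Int) with hnd
  rw [PySem.Int.floordiv_eq_ediv_of_pos (by omega), PySem.Int.floordiv_eq_ediv_of_pos (by omega)]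
  set c : Int := s + e + 1 - n with hcd
  have hc0 : c ≤ 0 := by omega
  have hk : max 0 (n - 1 - mcl) = max 0 (n - mcl) - 1 := by omega
  rw [hk]
  set k : Int := max 0 (n - mcl) with hkd
  have hk1 : 1 ≤ k := by omega
  have harg : k - 1 + (s + e + 1 - (n - 1)) = k + c := by omega
  rw [harg]
  set d : Int := (k + c) / 2 with hdd
  have hdk : d ≤ k - 1 := by omega
  have hf : max 0 (min (k - 1) d) = max 0 (min k d) := by omega
  rw [hf]
  set f : Int := max 0 (min k d) with hfd
  have hf0 : 0 ≤ f := by omega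
  have hfk1 : f ≤ k - 1 := by omega
  have hkn : k ≤ n := by omega
  have hhi : n - 1 - (k - 1 - f) = n - (k - f) := by omega
  rw [hhi]
  have hb0 : 0 ≤ n - (k - f) := by omega
  have hbn : n - (k - f) ≤ n - 1 := by omega
  simp only [Prod.mk.injEq]
  refine ⟨slice_dropLast_eq context f (n - (k - f)) hf0 hb0 hbn, ?_⟩
  cases ap with
  | none => rfl
  | some l =>
    simp only [Option.map_some, Option.some.injEq]
    exact slice_dropLast_eq l f (n - (k - f)) hf0 hb0 (by rw [hl l rfl]; exact hbn)

-- A's loop computes B's closed form, given enough fuel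
lemma loop_eq_alt (mcl : Int) (hm : 0 ≤ mcl) :
    ∀ (fuel : Nat) (cond : List Int) (ap : Option (List Int)) (s e : Int),
      cond.length ≤ fuel → (∀ l, ap = some l → l.length = cond.length) →
      truncate_context_loop fuel cond ap mcl s e = truncate_context_alt cond ap mcl s e := by
  intro fuel
  induction fuel with
  | zero =>
    intro cond ap s e hfuel hl
    have hnil : cond = [] := List.eq_nil_of_length_eq_zero (Nat.le_zero.mp hfuel)
    subst hnil
    simp only [truncate_context_loop]
    exact (alt_stop [] ap mcl s e hm (by simpa using hm) hl).symm
  | succ fuel ih =>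
    intro cond ap s e hfuel hl
    simp only [truncate_context_loop]
    by_cases hguard : (cond.length : Int) > mcl
    · rw [if_pos hguard]
      have hpos : 1 ≤ cond.length := by omega
      by_cases hbranch : s > (cond.length : Int) - e - 1
      · rw [if_pos hbranch, PySem.List.slice_from_one]
        cases ap with
        | none =>
          rw [ih cond.tail none (s - 1) (e - 1) (by rw [List.length_tail]; omega)
                (by intro l h; simp at h)]
          exact alt_front cond none mcl s e hm hguard hbranch hl
        | some l =>
          have hll := hl l rfl
          have hemp : l.isEmpty = false := by
            cases l with
            | nil => simp at hll; omega
            | cons x xs => rfl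
          simp only [hemp, Bool.false_eq_true, if_false, PySem.List.slice_from_one]
          rw [ih cond.tail (some l.tail) (s - 1) (e - 1) (by rw [List.length_tail]; omega)
                (by intro l' h'
                    simp only [Option.some.injEq] at h'
                    subst h'
                    rw [List.length_tail, List.length_tail, hll])]
          have h := alt_front cond (some l) mcl s e hm hguard hbranch hl
          simpa using h
      · rw [if_neg hbranch, PySem.List.slice_to_neg_one]
        cases ap with
        | none =>
          rw [ih cond.dropLast none s e (by rw [List.length_dropLast]; omega)
                (by intro l h; simp at h)]
          exact alt_back cond none mcl s e hm hguard hbranch hl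
        | some l =>
          have hll := hl l rfl
          have hemp : l.isEmpty = false := by
            cases l with
            | nil => simp at hll; omega
            | cons x xs => rfl
          simp only [hemp, Bool.false_eq_true, if_false, PySem.List.slice_to_neg_one]
          rw [ih cond.dropLast (some l.dropLast) s e (by rw [List.length_dropLast]; omega)
                (by intro l' h'
                    simp only [Option.some.injEq] at h'
                    subst h'
                    rw [List.length_dropLast, List.length_dropLast, hll])]
          have h := alt_back cond (some l) mcl s e hm hguard hbranch hl
          simpa using h
    · rw [if_neg hguard]
      exact (alt_stop cond ap mcl s e hm (by omega) hl).symm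

-- ===== VERDICT (by name: the statement is the Claim_ definition above) =====
theorem truncate_context_spec : Claim_equal_truncate_context := by
  intro context ans_pos mcl s e _hdom hpre
  obtain ⟨hm, hap⟩ := hpre
  unfold Spec_truncate_context truncate_context
  rw [PySem.List.slice_none_none]
  cases ans_pos with
  | none =>
    exact loop_eq_alt mcl hm context.length context none s e le_rfl
      (by intro l h; simp at h)
  | some l =>
    have hll : l.length = context.length := by
      rcases hap with h | h
      · simp at h
      · simpa using h
    simp only [PySem.List.slice_none_none]
    exact loop_eq_alt mcl hm context.length context (some l) s e le_rfl
      (by intro l' h'; simp only [Option.some.injEq] at h'; subst h'; exact hll)
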